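-- pv_equiv track=rewrite | github.com/iberdiev/coding_for_fun | Rummy card game implementation/question3-final.py | comp10001huxxy_valid_table
-- ===== SOURCE A (Python) =====
-- def comp10001huxxy_score(cards):
--     """
--     This function takes a single argument in the format of a list consisting
--     of two letter strings and takes the first element of each string, which
--     corresponds to a value and adds up the values to indicate a score for the
--     combined cards
--     """
--
--     # Dictionary assigning the values of each card
--     my_dict = {'A': 1, '2': 2, '3': 3, '4': 4, '5': 5, '6': 6, '7': 7, '8': 8,
--                '9': 9, '0': 10, 'J': 11, 'Q': 12, 'K': 13}
--
--     counter = 0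
--
--     # Case of empty list, the function should return 0
--     if cards == []:
--         return 0
--
--     # Selecting the first element of each two letter string in the cards list
--     # and finding their corresponding values in my_dict. Counter is the score
--     # for the combined cards
--     for i in range(len(cards)):
--         key = cards[i][0]
--         value = my_dict[key]
--         counter += value
--
--     return counter
--
-- def two_more_decks_used(groups):
--     from collections import defaultdict
--     d = defaultdict(int)
--     for group in groups:
--         for card in group:
--             d[card] += 1
--     for l in d:
--         if d[l] > 2:
--             return True
--     return False
--
-- def group_is_of_kind(group):
--     values = [card[0] for card in group]
--     return len(values) == values.count(values[0])
--
-- def group_of_kind_with_unique_suits(group):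
--     suits = set()
--     for card in group:
--         suits.add(card[1])
--     return True if len(suits) in [4, len(group)] else False
--
-- def group_is_run(group):
--     scores = sorted([comp10001huxxy_score([card]) for card in group])
--     if scores == list(range(min(scores), max(scores) + 1)):
--         return True
--     return False
--
-- def sort_cards_by_value(cards):
--     for i in range(len(cards) - 1):
--         for j in range(len(cards) - 1 - i):
--             if cards[j][1] > cards[j + 1][1]:
--                 cards[j], cards[j+1] = cards[j+1], cards[j]
--     return cards
--
-- def run_is_alternate_in_color(group):
--     group = [[card, comp10001huxxy_score([card])] for card in group]
--     group = sort_cards_by_value(group)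
--     suits = {'red': 'SC', 'black': 'HD'}
--     color_seq = []
--     for card in group:
--         color_seq.append('red' if card[0][1] in suits['red'] else 'black')
--     for i in range(len(color_seq) - 1):
--         if color_seq[i] == color_seq[i + 1]:
--             return False
--     return True
--
-- def comp10001huxxy_valid_table(groups):
--     for group in groups:  # Check if each group contains more that 2 cards
--         if len(group) < 3:
--             return False
--     if two_more_decks_used(groups):  # Check if used more than 2 decks
--         return False
--     for group in groups:
--         if group_is_of_kind(group):
--             # Check if group contains unique suits
--             if not group_of_kind_with_unique_suits(group):
--                 return False
--         else:  # Check if run is alternate in color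
--             if not (group_is_run(group) and run_is_alternate_in_color(group)):
--                 return False
--     return True
-- ===== SOURCE B (Python) =====
-- def comp10001huxxy_valid_table(groups):
--     from collections import Counter
--     if any(len(g) < 3 for g in groups):
--         return False
--     counts = Counter(card for g in groups for card in g)
--     if any(c > 2 for c in counts.values()):
--         return False
--     order = 'A234567890JQK'
--     for g in groups:
--         if len({card[0] for card in g}) == 1:
--             if len({card[1] for card in g}) not in (4, len(g)):
--                 return False
--         else:
--             cards = sorted(g, key=lambda c: order.find(c[0]))
--             for a, b in zip(cards, cards[1:]):
--                 if order.find(b[0]) != order.find(a[0]) + 1: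
--                     return False
--                 if (a[1] in 'SC') == (b[1] in 'SC'):
--                     return False
--     return True
-- ===== Notes on version B (the rewrite author's own statement) =====
-- stated objective: simpler
-- what changed: One inlined function: Counter replaces the defaultdict helper chain, of-kind/suits checks become set sizes, and the run test (sorted scores == range) plus the separate bubble-sort-then-color-scan collapse into one sort by card value followed by a single zip pass checking consecutiveness and color alternation together.
-- outside the precondition, e.g. on comp10001huxxy_valid_table([['2H', '2H', '3H'], ['X?', 'Y?', 'Z?']]): A returns False, B returns False
import Mathlib
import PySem

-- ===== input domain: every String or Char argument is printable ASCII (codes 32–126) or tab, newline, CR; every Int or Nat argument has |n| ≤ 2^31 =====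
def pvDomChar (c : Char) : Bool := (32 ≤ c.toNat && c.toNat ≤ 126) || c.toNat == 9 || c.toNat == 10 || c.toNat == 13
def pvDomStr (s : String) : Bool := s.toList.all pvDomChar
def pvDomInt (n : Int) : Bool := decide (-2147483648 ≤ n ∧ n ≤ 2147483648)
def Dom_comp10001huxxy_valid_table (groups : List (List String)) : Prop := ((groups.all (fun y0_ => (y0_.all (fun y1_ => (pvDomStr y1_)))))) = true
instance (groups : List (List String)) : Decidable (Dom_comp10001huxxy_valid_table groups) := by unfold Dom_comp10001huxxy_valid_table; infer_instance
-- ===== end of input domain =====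

-- B merges A's five helpers into one function: a Counter for the deck check, set sizes for the
-- of-kind checks, and one sort-by-value plus a single adjacent pass that checks run
-- consecutiveness and colour alternation together (objective: simpler).

-- ===== PORT A =====

def scoreDict : PySem.Dict Char Int :=
  PySem.Dict.ofList [('A',1),('2',2),('3',3),('4',4),('5',5),('6',6),('7',7),('8',8),('9',9),('0',10),('J',11),('Q',12),('K',13)]

def comp10001huxxy_score (cards : List String) : Int :=
  if cards = [] then 0
  else
    (PySem.List.pyRange 0 (cards.length : Int)).foldl
      (fun counter i =>
        -- key = cards[i][0]; value = my_dict[key].  IndexError (empty string) and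
        -- KeyError (unknown value character) are excluded by Pre_; the defaults stand in there.
        let key := (PySem.Str.pyGet? (PySem.List.pyGetD cards i "") 0).getD ' '
        counter + scoreDict.getD key 0)
      0

def group_is_of_kind (group : List String) : Bool :=
  let values := group.map (fun card => (PySem.Str.pyGet? card 0).getD ' ')   -- card[0]; IndexError excluded by Pre_
  values.length == values.count (PySem.List.pyGetD values 0 ' ')             -- values[0]; group ≠ [] under Pre_

def group_of_kind_with_unique_suits (group : List String) : Bool :=
  let suits := group.foldl (fun s card => PySem.Set.add s ((PySem.Str.pyGet? card 1).getD ' ')) PySem.Set.empty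
  ([4, (group.length : Int)]).contains (PySem.Set.len suits)

def group_is_run (group : List String) : Bool :=
  let scores := PySem.List.sorted (group.map (fun card => comp10001huxxy_score [card])) (fun x => x)
  match PySem.List.min? scores (fun x => x), PySem.List.max? scores (fun x => x) with
  | some m, some M => scores == PySem.List.pyRange m (M + 1)
  | _, _ => false            -- min/max of [] raises ValueError; unreachable: groups have ≥ 3 cards here

-- inner loop of sort_cards_by_value: one bubble pass of k adjacent compare-and-swap steps
-- ('for j in range(k): if cards[j][1] > cards[j+1][1]: swap'), as the obvious structural recursion
def bpass : Nat → List (String × Int) → List (String × Int)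
  | k+1, a :: b :: t => if a.2 > b.2 then b :: bpass k (a :: t) else a :: bpass k (b :: t)
  | _, l => l

def sort_cards_by_value (cards : List (String × Int)) : List (String × Int) :=
  (PySem.List.pyRange 0 ((cards.length : Int) - 1)).foldl
    (fun cs i => bpass (cards.length - 1 - i.toNat) cs) cards

-- 'red' if card[1] in suits['red'] else 'black'   (suits = {'red': 'SC', 'black': 'HD'})
def cardColor (card : String) : String :=
  if PySem.Chars.isIn [(PySem.Str.pyGet? card 1).getD ' '] ['S', 'C'] then "red" else "black"

def run_is_alternate_in_color (group : List String) : Bool :=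
  let pairs := sort_cards_by_value (group.map (fun card => (card, comp10001huxxy_score [card])))
  let color_seq := pairs.map (fun p => cardColor p.1)
  (PySem.List.pyRange 0 ((color_seq.length : Int) - 1)).all
    (fun i => !(PySem.List.pyGetD color_seq i "" == PySem.List.pyGetD color_seq (i + 1) ""))

def two_more_decks_used (groups : List (List String)) : Bool :=
  let d := groups.foldl (fun d g => g.foldl (fun d card => d.modify card 0 (· + (1 : Int))) d) PySem.Dict.empty
  d.keys.any (fun k => d.getD k 0 > 2)     -- 'for l in d: if d[l] > 2: return True' (insertion order)

def comp10001huxxy_valid_table (groups : List (List String)) : Bool :=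
  if groups.any (fun g => g.length < 3) then false
  else if two_more_decks_used groups then false
  else groups.all (fun g =>
    if group_is_of_kind g then group_of_kind_with_unique_suits g
    else group_is_run g && run_is_alternate_in_color g)

-- ===== PORT B =====

-- order.find(c[0]) for order = 'A234567890JQK' (Source B uses str.find; under Pre_ the char is present)
def cardIdx (card : String) : Int :=
  PySem.Chars.find ['A','2','3','4','5','6','7','8','9','0','J','Q','K'] [(PySem.Str.pyGet? card 0).getD ' ']

def isRed (card : String) : Bool :=
  PySem.Chars.isIn [(PySem.Str.pyGet? card 1).getD ' '] ['S', 'C']    -- card[1] in 'SC'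

def altCheckGroup (g : List String) : Bool :=
  if PySem.Set.len (PySem.Set.ofList (g.map (fun c => (PySem.Str.pyGet? c 0).getD ' '))) == 1 then
    ([4, (g.length : Int)]).contains
      (PySem.Set.len (PySem.Set.ofList (g.map (fun c => (PySem.Str.pyGet? c 1).getD ' '))))
  else
    let cards := PySem.List.sorted g cardIdx
    (cards.zip cards.tail).all
      (fun ab => (cardIdx ab.2 == cardIdx ab.1 + 1) && (isRed ab.1 != isRed ab.2))

def comp10001huxxy_valid_table_alt (groups : List (List String)) : Bool :=
  if groups.any (fun g => g.length < 3) then false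
  else
    let counts := PySem.Dict.counter (groups.flatMap id)
    if counts.values.any (fun c => c > 2) then false
    else groups.all altCheckGroup

-- ===== PRECONDITION & SPEC =====

def validVals : List Char := ['A','2','3','4','5','6','7','8','9','0','J','Q','K']

def wfCard (card : String) : Bool := 2 ≤ card.toList.length

def sameFirst (g : List String) : Bool :=
  g.all (fun c => c.toList.headD ' ' == (g.headD "").toList.headD ' ')

-- Pre_ admits every input with an under-3 group or a card used more than twice (A answers those
-- before reading any card's characters) and otherwise requires each card to have ≥ 2 characters
-- with, in groups whose first characters are not all equal, a recognised value character; excluded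
-- are the inputs where A raises IndexError/KeyError on a malformed card, together with those where
-- an earlier failing group happens to make A return False before reaching the malformed card.
def Pre_comp10001huxxy_valid_table (groups : List (List String)) : Prop :=
  (∃ g ∈ groups, g.length < 3)
  ∨ (∃ card ∈ groups.flatMap id, 2 < (groups.flatMap id).count card)
  ∨ (∀ g ∈ groups, (∀ card ∈ g, wfCard card = true)
      ∧ (sameFirst g = true ∨ ∀ card ∈ g, validVals.contains (card.toList.headD ' ') = true))

instance (groups : List (List String)) : Decidable (Pre_comp10001huxxy_valid_table groups) := by
  unfold Pre_comp10001huxxy_valid_table; infer_instance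

def pvWitness_comp10001huxxy_valid_table : List (List String) := [["AS", "2H", "3S"]]

def Spec_comp10001huxxy_valid_table (groups : List (List String)) (out : Bool) : Prop :=
  out = comp10001huxxy_valid_table_alt groups
instance (groups : List (List String)) (out : Bool) : Decidable (Spec_comp10001huxxy_valid_table groups out) := by
  unfold Spec_comp10001huxxy_valid_table; infer_instance

-- ===== CLAIM (what is proved, stated in full; the proofs are below) =====
def Claim_equal_comp10001huxxy_valid_table : Prop :=
  ∀ (groups : List (List String)), Dom_comp10001huxxy_valid_table groups →
    Pre_comp10001huxxy_valid_table groups →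
    Spec_comp10001huxxy_valid_table groups (comp10001huxxy_valid_table groups)

-- ===== LEMMAS AND PROOFS =====

-- adjacent-pair check, the common normal form of both programs' run/colour scans
def adjAll {α : Type} (p : α → α → Bool) : List α → Bool
  | a :: b :: t => p a b && adjAll p (b :: t)
  | _ => true

theorem adjAll_cons₂ {α : Type} (p : α → α → Bool) (a b : α) (t : List α) :
    adjAll p (a :: b :: t) = (p a b && adjAll p (b :: t)) := rfl

theorem zip_tail_eq_adjAll {α : Type} (p : α → α → Bool) (l : List α) :
    (l.zip l.tail).all (fun ab => p ab.1 ab.2) = adjAll p l := by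
  induction l with
  | nil => rfl
  | cons a t ih =>
    cases t with
    | nil => rfl
    | cons b t' => simpa [adjAll_cons₂] using congrArg (fun x => p a b && x) ih

theorem adjAll_and {α : Type} (p q : α → α → Bool) (l : List α) :
    adjAll (fun a b => p a b && q a b) l = (adjAll p l && adjAll q l) := by
  induction l with
  | nil => rfl
  | cons a t ih =>
    cases t with
    | nil => rfl
    | cons b t' =>
      rw [adjAll_cons₂, adjAll_cons₂, adjAll_cons₂, ih]
      cases p a b <;> cases q a b <;> cases adjAll p (b :: t') <;> cases adjAll q (b :: t') <;> rfl

theorem adjAll_map {α β : Type} (f : α → β) (p : β → β → Bool) (l : List α) :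
    adjAll p (l.map f) = adjAll (fun a b => p (f a) (f b)) l := by
  induction l with
  | nil => rfl
  | cons a t ih =>
    cases t with
    | nil => rfl
    | cons b t' => simpa [adjAll_cons₂] using congrArg (fun x => p (f a) (f b) && x) ih

theorem adjAll_congr {α : Type} (p q : α → α → Bool) (l : List α)
    (h : ∀ a ∈ l, ∀ b ∈ l, p a b = q a b) : adjAll p l = adjAll q l := by
  induction l with
  | nil => rfl
  | cons a t ih =>
    cases t with
    | nil => rfl
    | cons b t' =>
      rw [adjAll_cons₂, adjAll_cons₂, h a (by simp) b (by simp),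
        ih (fun x hx y hy => h x (List.mem_cons_of_mem _ hx) y (List.mem_cons_of_mem _ hy))]

theorem getD_range_adjAll {α : Type} (p : α → α → Bool) (l : List α) (d : α) :
    (List.range (l.length - 1)).all (fun k => p (l.getD k d) (l.getD (k + 1) d)) = adjAll p l := by
  induction l with
  | nil => rfl
  | cons a t ih =>
    cases t with
    | nil => rfl
    | cons b t' =>
      have hlen : (a :: b :: t').length - 1 = ((b :: t').length - 1) + 1 := by simp
      rw [hlen, List.range_succ_eq_map, adjAll_cons₂, ← ih]
      simp only [List.all_cons, List.all_map]
      have h1 : (a :: b :: t').getD 0 d = a := rfl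
      have h2 : (a :: b :: t').getD (0 + 1) d = b := rfl
      have h3 : ((fun k => p ((a :: b :: t').getD k d) ((a :: b :: t').getD (k + 1) d)) ∘ Nat.succ)
          = (fun k => p ((b :: t').getD k d) ((b :: t').getD (k + 1) d)) := by funext k; rfl
      rw [h1, h2, h3]

theorem pyRange_nil {a b : Int} (h : b ≤ a) : PySem.List.pyRange a b = [] := by
  refine List.eq_nil_iff_forall_not_mem.mpr (fun x hx => ?_)
  rw [PySem.List.mem_pyRange_one] at hx; omega

theorem pyrange_adjAll {α : Type} (p : α → α → Bool) (l : List α) (d : α) :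
    (PySem.List.pyRange 0 ((l.length : Int) - 1)).all
        (fun i => p (PySem.List.pyGetD l i d) (PySem.List.pyGetD l (i + 1) d)) = adjAll p l := by
  cases l with
  | nil => rfl
  | cons a t =>
    have h0 : (((a :: t).length : Int)) - 1 = ((t.length : Nat) : Int) := by simp
    rw [h0, PySem.List.pyRange_zero_natCast, List.all_map]
    have h1 : ((fun i : Int => p (PySem.List.pyGetD (a :: t) i d) (PySem.List.pyGetD (a :: t) (i + 1) d))
          ∘ (fun k : Nat => (k : Int)))
        = fun k : Nat => p ((a :: t).getD k d) ((a :: t).getD (k + 1) d) := by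
      funext k
      simp only [Function.comp_apply]
      have hk : ((k : Int) + 1) = ((k + 1 : Nat) : Int) := by push_cast; ring
      rw [hk, PySem.List.pyGetD_natCast, PySem.List.pyGetD_natCast]
    rw [h1]
    have h2 : t.length = (a :: t).length - 1 := by simp
    rw [h2, getD_range_adjAll]

-- consecutive integers
def step1 : Int → Int → Bool := fun x y => y == x + 1

theorem adjAll_step1_pyRange (n : Nat) (a : Int) : adjAll step1 (PySem.List.pyRange a (a + n)) = true := by
  induction n generalizing a with
  | zero =>
    have : a + ((0 : Nat) : Int) = a := by simp
    rw [this, pyRange_nil (le_refl a)]; rfl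
  | succ n ih =>
    have hlt : a < a + ((n + 1 : Nat) : Int) := by push_cast; omega
    rw [PySem.List.pyRange_one_cons hlt]
    cases n with
    | zero =>
      have : PySem.List.pyRange (a + 1) (a + ((0 + 1 : Nat) : Int)) = [] := by
        apply pyRange_nil; push_cast; omega
      rw [this]; rfl
    | succ m =>
      have hlt2 : a + 1 < a + ((m + 1 + 1 : Nat) : Int) := by push_cast; omega
      rw [PySem.List.pyRange_one_cons hlt2, adjAll_cons₂]
      have hs : step1 a (a + 1) = true := by simp [step1]
      rw [hs, ← PySem.List.pyRange_one_cons hlt2, Bool.true_and]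
      have harg : a + ((m + 1 + 1 : Nat) : Int) = (a + 1) + ((m + 1 : Nat) : Int) := by push_cast; ring
      rw [harg]
      exact ih (a + 1)

theorem adjAll_step1_pairwise (l : List Int) (h : adjAll step1 l = true) : l.Pairwise (· < ·) := by
  induction l with
  | nil => exact List.Pairwise.nil
  | cons a t ih =>
    cases t with
    | nil => simp
    | cons b t' =>
      rw [adjAll_cons₂, Bool.and_eq_true] at h
      have hb : b = a + 1 := by simpa [step1] using h.1
      have hp := ih h.2
      refine List.Pairwise.cons (fun x hx => ?_) hp
      rcases List.mem_cons.mp hx with hx | hx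
      · omega
      · have := List.rel_of_pairwise_cons hp hx; omega

theorem adjAll_step1_le_getLast (l : List Int) (a : Int) (h : adjAll step1 (a :: l) = true) :
    a ≤ (a :: l).getLast (by simp) := by
  induction l generalizing a with
  | nil => simp
  | cons b t ih =>
    rw [adjAll_cons₂, Bool.and_eq_true] at h
    have hb : b = a + 1 := by simpa [step1] using h.1
    have := ih b h.2
    rw [List.getLast_cons (by simp : (b :: t) ≠ [])]
    omega

theorem adjAll_step1_eq_pyRange (l : List Int) (a : Int) (h : adjAll step1 (a :: l) = true) :
    a :: l = PySem.List.pyRange a ((a :: l).getLast (by simp) + 1) := by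
  induction l generalizing a with
  | nil =>
    simp only [List.getLast_singleton]
    rw [PySem.List.pyRange_one_cons (by omega : a < a + 1), pyRange_nil (le_refl (a + 1))]
  | cons b t ih =>
    rw [adjAll_cons₂, Bool.and_eq_true] at h
    have hb : b = a + 1 := by simpa [step1] using h.1
    have hL : b ≤ (b :: t).getLast (by simp) := adjAll_step1_le_getLast t b h.2
    have hrec := ih b h.2
    rw [List.getLast_cons (by simp : (b :: t) ≠ [])]
    rw [PySem.List.pyRange_one_cons (by omega : a < (b :: t).getLast (List.cons_ne_nil b t) + 1)]
    rw [← hb, ← hrec]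

theorem pairwise_le_getLast (l : List Int) (a : Int) (h : (a :: l).Pairwise (· ≤ ·)) :
    ∀ x ∈ a :: l, x ≤ (a :: l).getLast (by simp) := by
  induction l generalizing a with
  | nil => simp
  | cons b t ih =>
    have hp := List.pairwise_cons.mp h
    have := ih b hp.2
    intro x hx
    rw [List.getLast_cons (by simp : (b :: t) ≠ [])]
    rcases List.mem_cons.mp hx with hx | hx
    · subst hx
      have hab : x ≤ b := hp.1 b (by simp)
      have := ih b hp.2 b (by simp)
      omega
    · exact ih b hp.2 x hx

-- A's run test equals the adjacent +1 scan of the sorted score list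
theorem run_eq_adj (g : List String) (hg : g ≠ []) :
    group_is_run g
      = adjAll step1 (PySem.List.sorted (g.map (fun c => comp10001huxxy_score [c])) (fun x => x)) := by
  unfold group_is_run
  have hl : PySem.List.sorted (g.map (fun c => comp10001huxxy_score [c])) (fun x => x) ≠ [] := by
    rw [Ne, PySem.List.sorted_eq_nil_iff, List.map_eq_nil_iff]; exact hg
  set l := PySem.List.sorted (g.map (fun c => comp10001huxxy_score [c])) (fun x => x) with hldef
  clear_value l
  have hpw : l.Pairwise (fun a b : Int => a ≤ b) := hldef ▸ PySem.List.sorted_pairwise _ _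
  cases hm : PySem.List.min? l (fun x => x) with
  | none => exact absurd ((PySem.List.min?_eq_none_iff _ _).mp hm) hl
  | some m =>
    cases hM : PySem.List.max? l (fun x => x) with
    | none => exact absurd ((PySem.List.max?_eq_none_iff _ _).mp hM) hl
    | some M =>
      change (match PySem.List.min? l fun x => x, PySem.List.max? l fun x => x with
        | some m, some M => l == PySem.List.pyRange m (M + 1)
        | _, _ => false) = adjAll step1 l
      rw [hm, hM]
      show (l == PySem.List.pyRange m (M + 1)) = adjAll step1 l
      rw [Bool.eq_iff_iff, beq_iff_eq]
      constructor
      · intro he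
        have hmM : m ≤ M :=
          PySem.List.min?_isMin hm M (PySem.List.max?_mem hM)
        have hn : M + 1 = m + (((M + 1 - m).toNat : Nat) : Int) := by omega
        rw [he, hn]
        exact adjAll_step1_pyRange _ m
      · intro ha
        obtain ⟨a, t, rfl⟩ : ∃ a t, l = a :: t := by
          cases l with
          | nil => exact absurd rfl hl
          | cons a t => exact ⟨a, t, rfl⟩
        have hma : m = a := by
          have h1 : m ≤ a := PySem.List.min?_isMin hm a (by simp)
          have h2 : a ≤ m := by
            rcases List.mem_cons.mp (PySem.List.min?_mem hm) with h | h
            · omega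
            · exact List.rel_of_pairwise_cons hpw h
          omega
        have hML : M = (a :: t).getLast (by simp) := by
          have h1 : (a :: t).getLast (by simp) ≤ M :=
            PySem.List.max?_isMax hM _ (List.getLast_mem (by simp))
          have h2 : M ≤ (a :: t).getLast (by simp) :=
            pairwise_le_getLast t a hpw M (PySem.List.max?_mem hM)
          omega
        rw [hma, hML]
        exact adjAll_step1_eq_pyRange t a ha

-- bubble sort facts
theorem bpass_append (k : Nat) (p s : List (String × Int)) (h : p.length = k + 1) :
    bpass k (p ++ s) = bpass k p ++ s := by
  induction k generalizing p s with
  | zero =>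
    match p, h with
    | [a], _ => cases s <;> rfl
  | succ k ih =>
    match p, h with
    | a :: b :: p', h =>
      show (if a.2 > b.2 then b :: bpass k (a :: (p' ++ s)) else a :: bpass k (b :: (p' ++ s)))
          = (if a.2 > b.2 then b :: bpass k (a :: p') else a :: bpass k (b :: p')) ++ s
      have h' : (a :: p').length = k + 1 := by simp at h ⊢; omega
      have h'' : (b :: p').length = k + 1 := by simp at h ⊢; omega
      split
      · rw [show a :: (p' ++ s) = (a :: p') ++ s from rfl, ih (a :: p') s h']; rfl
      · rw [show b :: (p' ++ s) = (b :: p') ++ s from rfl, ih (b :: p') s h'']; rfl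

theorem bpass_last (t : List (String × Int)) (a : String × Int) :
    ∃ l' m, bpass t.length (a :: t) = l' ++ [m] ∧ (l' ++ [m]).Perm (a :: t) ∧ ∀ x ∈ l', x.2 ≤ m.2 := by
  induction t generalizing a with
  | nil => exact ⟨[], a, rfl, List.Perm.refl _, by simp⟩
  | cons b t' ih =>
    show ∃ l' m, (if a.2 > b.2 then b :: bpass t'.length (a :: t') else a :: bpass t'.length (b :: t')) = l' ++ [m] ∧ _ ∧ _
    by_cases hab : a.2 > b.2
    · obtain ⟨l'', m, heq, hperm, hbnd⟩ := ih a
      refine ⟨b :: l'', m, by rw [if_pos hab, heq]; rfl, ?_, ?_⟩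
      · exact (hperm.cons b).trans (List.Perm.swap a b t')
      · intro x hx
        rcases List.mem_cons.mp hx with rfl | hx
        · have hm : a ∈ l'' ++ [m] := hperm.mem_iff.mpr (by simp)
          rcases List.mem_append.mp hm with h | h
          · exact le_trans (le_of_lt hab) (hbnd a h)
          · simp at h; rw [← h]; omega
        · exact hbnd x hx
    · obtain ⟨l'', m, heq, hperm, hbnd⟩ := ih b
      refine ⟨a :: l'', m, by rw [if_neg hab, heq]; rfl, (hperm.cons a).trans (List.Perm.refl _), ?_⟩
      intro x hx
      rcases List.mem_cons.mp hx with rfl | hx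
      · have hm : b ∈ l'' ++ [m] := hperm.mem_iff.mpr (by simp)
        rcases List.mem_append.mp hm with h | h
        · exact le_trans (by omega) (hbnd b h)
        · simp at h; rw [← h]; omega
      · exact hbnd x hx

theorem bubble_inv (cards : List (String × Int)) : ∀ j, j ≤ cards.length - 1 →
    ∃ p s, ((List.range j).foldl (fun cs k => bpass (cards.length - 1 - k) cs) cards) = p ++ s
      ∧ (p ++ s).Perm cards ∧ p.length = cards.length - j ∧ s.Pairwise (fun x y => x.2 ≤ y.2)
      ∧ ∀ x ∈ p, ∀ y ∈ s, x.2 ≤ y.2 := by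
  intro j
  induction j with
  | zero => exact fun _ => ⟨cards, [], by simp, by simp, by simp, by simp, by simp⟩
  | succ j ih =>
    intro hj
    obtain ⟨p, s, heq, hperm, hlen, hsort, hbnd⟩ := ih (by omega)
    rw [List.range_succ, List.foldl_append, heq]
    simp only [List.foldl_cons, List.foldl_nil]
    have hn1 : 1 ≤ cards.length := by omega
    have hple : p.length = (cards.length - 1 - j) + 1 := by
      rw [hlen]; omega
    rw [bpass_append _ p s hple]
    match p, hple with
    | a :: t, hple =>
      have ht : t.length = cards.length - 1 - j := by simp at hple; omega
      rw [← ht]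
      obtain ⟨l', m, hbp, hbperm, hbbnd⟩ := bpass_last t a
      rw [hbp]
      have hmem_p : ∀ z, z ∈ l' ++ [m] → z ∈ a :: t := fun z hz => hbperm.mem_iff.mp hz
      refine ⟨l', m :: s, by simp, ?_, ?_, ?_, ?_⟩
      · have h1 : (l' ++ m :: s) = (l' ++ [m]) ++ s := by simp
        rw [h1]
        exact (hbperm.append_right s).trans hperm
      · have : l'.length + 1 = t.length + 1 := by
          simpa using hbperm.length_eq
        omega
      · refine List.Pairwise.cons (fun y hy => ?_) hsort
        exact hbnd m (hmem_p m (by simp)) y hy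
      · intro x hx y hy
        rcases List.mem_cons.mp hy with rfl | hy
        · exact hbbnd x hx
        · exact hbnd x (hmem_p x (List.mem_append_left _ hx)) y hy

theorem sort_cards_sorted (cards : List (String × Int)) :
    (sort_cards_by_value cards).Perm cards ∧ (sort_cards_by_value cards).Pairwise (fun x y => x.2 ≤ y.2) := by
  unfold sort_cards_by_value
  cases cards with
  | nil =>
    have h : PySem.List.pyRange 0 ((([] : List (String × Int)).length : Int) - 1) = [] :=
      pyRange_nil (by simp)
    rw [h]
    exact ⟨List.Perm.refl _, List.Pairwise.nil⟩
  | cons c0 rest =>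
    have h0 : (((c0 :: rest).length : Int) - 1) = ((rest.length : Nat) : Int) := by simp
    rw [h0, PySem.List.pyRange_zero_natCast, List.foldl_map]
    rw [show (fun (x : List (String × Int)) (y : Nat) =>
          bpass ((c0 :: rest).length - 1 - ((fun k : Nat => (k : Int)) y).toNat) x)
        = fun cs k => bpass ((c0 :: rest).length - 1 - k) cs from by funext cs k; simp]
    obtain ⟨p, s, heq, hperm, hlen, hsort, hbnd⟩ :=
      bubble_inv (c0 :: rest) rest.length (by simp)
    rw [heq]
    have hp1 : p.length = 1 := by simp at hlen; omega
    obtain ⟨x, rfl⟩ : ∃ x, p = [x] := List.length_eq_one_iff.mp hp1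
    constructor
    · exact hperm
    · rw [List.singleton_append]
      exact List.Pairwise.cons (fun y hy => hbnd x (by simp) y hy) hsort

-- score value arithmetic under a recognised value character
theorem score_single (card : String) :
    comp10001huxxy_score [card] = scoreDict.getD ((PySem.Str.pyGet? card 0).getD ' ') 0 := by
  unfold comp10001huxxy_score
  rw [if_neg (by simp)]
  have h0 : (([card] : List String).length : Int) = 1 := by simp
  rw [h0]
  have h1 : PySem.List.pyRange 0 1 = [0] := rfl
  rw [h1]
  simp [PySem.List.pyGetD_zero_cons]

theorem score_eq_idx_add_one (card : String)
    (h : validVals.contains (card.toList.headD ' ') = true) :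
    comp10001huxxy_score [card] = cardIdx card + 1 := by
  have hget : PySem.Str.pyGet? card 0 = card.toList[0]? := by
    have := PySem.Str.pyGet?_natCast card 0
    simpa using this
  have hc : (PySem.Str.pyGet? card 0).getD ' ' = card.toList.headD ' ' := by
    rw [hget]
    cases card.toList with
    | nil => rfl
    | cons c rest => rfl
  rw [score_single]
  unfold cardIdx
  rw [hc]
  have hmem : card.toList.headD ' ' ∈ validVals := by
    simpa using h
  simp only [validVals, List.mem_cons, List.not_mem_nil, or_false] at hmem
  rcases hmem with h | h | h | h | h | h | h | h | h | h | h | h | h <;> rw [h] <;> decide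

theorem first_char_eq (card : String) :
    (PySem.Str.pyGet? card 0).getD ' ' = card.toList.headD ' ' := by
  have h : PySem.Str.pyGet? card 0 = card.toList[0]? := by
    simpa using PySem.Str.pyGet?_natCast card 0
  rw [h]
  cases card.toList with
  | nil => rfl
  | cons c rest => rfl

theorem set_add_length_le (s : PySem.Set Char) (x : Char) :
    s.length ≤ (PySem.Set.add s x).length := by
  unfold PySem.Set.add; split <;> simp

theorem foldl_add_length_le (t : List Char) : ∀ s : PySem.Set Char,
    s.length ≤ (t.foldl PySem.Set.add s).length := by
  induction t with
  | nil => exact fun s => le_refl _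
  | cons b t' ih => exact fun s => le_trans (set_add_length_le s b) (ih _)

theorem foldl_add_singleton_len (t : List Char) (a : Char) :
    ((t.foldl PySem.Set.add [a]).length = 1) ↔ (∀ b ∈ t, b = a) := by
  induction t with
  | nil => simp
  | cons b t' ih =>
    by_cases hb : b = a
    · subst hb
      have h1 : PySem.Set.add [b] b = [b] := by
        unfold PySem.Set.add; rw [if_pos (by simp)]
      rw [List.foldl_cons, h1, ih]
      simp
    · have h1 : PySem.Set.add [a] b = [a, b] := by
        unfold PySem.Set.add
        rw [if_neg (by simp [hb])]; rfl
      rw [List.foldl_cons, h1]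
      constructor
      · intro h
        exact absurd h (by have := foldl_add_length_le t' [a, b]; simp at this; omega)
      · intro h
        exact absurd (h b (by simp)) hb

-- of-kind dispatch
theorem ofKind_eq_sameFirst (g : List String) (hg : g ≠ []) :
    group_is_of_kind g = sameFirst g := by
  match g, hg with
  | c :: rest, _ =>
    unfold group_is_of_kind sameFirst
    simp only [List.map_cons, PySem.List.pyGetD_zero_cons, List.headD_cons]
    rw [Bool.eq_iff_iff, beq_iff_eq, eq_comm, List.count_eq_length, List.all_eq_true]
    have hmem : ∀ b, b ∈ ((PySem.Str.pyGet? c 0).getD ' '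
          :: List.map (fun card => (PySem.Str.pyGet? card 0).getD ' ') rest)
        ↔ ∃ x ∈ c :: rest, (PySem.Str.pyGet? x 0).getD ' ' = b := by
      intro b
      constructor
      · intro hb
        rcases List.mem_cons.mp hb with rfl | hb
        · exact ⟨c, by simp, rfl⟩
        · obtain ⟨x, hx, rfl⟩ := List.mem_map.mp hb
          exact ⟨x, List.mem_cons_of_mem _ hx, rfl⟩
      · rintro ⟨x, hx, rfl⟩
        rcases List.mem_cons.mp hx with rfl | hx
        · exact List.mem_cons_self
        · exact List.mem_cons_of_mem _ (List.mem_map_of_mem hx)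
    constructor
    · intro h x hx
      rw [beq_iff_eq, ← first_char_eq x, ← first_char_eq c]
      exact (h _ ((hmem _).mpr ⟨x, hx, rfl⟩)).symm
    · intro h b hb
      obtain ⟨x, hx, rfl⟩ := (hmem _).mp hb
      have := h x hx
      rw [beq_iff_eq, ← first_char_eq x, ← first_char_eq c] at this
      exact this.symm

theorem ofKind_eq_setLen (g : List String) (hg : g ≠ []) :
    group_is_of_kind g
      = (PySem.Set.len (PySem.Set.ofList (g.map (fun c => (PySem.Str.pyGet? c 0).getD ' '))) == 1) := by
  match g, hg with
  | c :: rest, _ =>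
    unfold group_is_of_kind
    simp only [List.map_cons, PySem.List.pyGetD_zero_cons]
    rw [Bool.eq_iff_iff, beq_iff_eq, beq_iff_eq, eq_comm, List.count_eq_length]
    unfold PySem.Set.len
    rw [PySem.Set.ofList_eq_foldl, List.foldl_cons]
    have hadd : PySem.Set.add ([] : PySem.Set Char) ((PySem.Str.pyGet? c 0).getD ' ')
        = [(PySem.Str.pyGet? c 0).getD ' '] := rfl
    rw [hadd]
    rw [show ((((List.map (fun c => (PySem.Str.pyGet? c 0).getD ' ') rest).foldl PySem.Set.add
          [(PySem.Str.pyGet? c 0).getD ' ']).length : Int) = 1)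
        ↔ ((List.map (fun c => (PySem.Str.pyGet? c 0).getD ' ') rest).foldl PySem.Set.add
          [(PySem.Str.pyGet? c 0).getD ' ']).length = 1 from Nat.cast_eq_one]
    rw [foldl_add_singleton_len]
    constructor
    · intro h b hb
      exact (h b (List.mem_cons_of_mem _ hb)).symm
    · intro h b hb
      rcases List.mem_cons.mp hb with rfl | hb
      · rfl
      · exact (h _ hb).symm

theorem suits_eq (g : List String) :
    group_of_kind_with_unique_suits g
      = ([4, (g.length : Int)]).contains
          (PySem.Set.len (PySem.Set.ofList (g.map (fun c => (PySem.Str.pyGet? c 1).getD ' ')))) := by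
  unfold group_of_kind_with_unique_suits
  rw [PySem.Set.ofList_eq_foldl, List.foldl_map]
  rfl

-- the per-group equivalence
theorem group_eq (g : List String) (hg : g ≠ [])
    (hv : sameFirst g = true ∨ ∀ c ∈ g, validVals.contains (c.toList.headD ' ') = true) :
    (if group_is_of_kind g then group_of_kind_with_unique_suits g
     else group_is_run g && run_is_alternate_in_color g) = altCheckGroup g := by
  unfold altCheckGroup
  rw [← ofKind_eq_setLen g hg]
  by_cases hk : group_is_of_kind g = true
  · rw [if_pos hk, if_pos hk, suits_eq]
  · rw [if_neg hk, if_neg hk]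
    have hvalid : ∀ c ∈ g, validVals.contains (c.toList.headD ' ') = true := by
      rcases hv with hv | hv
      · exact absurd ((ofKind_eq_sameFirst g hg).trans hv) hk
      · exact hv
    have hscore : ∀ c ∈ g, comp10001huxxy_score [c] = cardIdx c + 1 := fun c hc =>
      score_eq_idx_add_one c (hvalid c hc)
    have hSmem : ∀ c ∈ PySem.List.sorted g cardIdx, c ∈ g := fun c hc =>
      (PySem.List.sorted_perm g cardIdx false).mem_iff.mp hc
    have hmap1 : (PySem.List.sorted g cardIdx).map (fun c => comp10001huxxy_score [c])
        = (PySem.List.sorted g cardIdx).map (fun c => cardIdx c + 1) :=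
      List.map_congr_left (fun c hc => hscore c (hSmem c hc))
    have hsorted_scores : PySem.List.sorted (g.map (fun c => comp10001huxxy_score [c])) (fun x => x)
        = (PySem.List.sorted g cardIdx).map (fun c => comp10001huxxy_score [c]) := by
      refine List.Perm.eq_of_pairwise (le := fun a b : Int => a ≤ b)
        (fun a b _ _ h1 h2 => le_antisymm h1 h2)
        (PySem.List.sorted_pairwise _ _) ?_ ?_
      · rw [hmap1]
        exact List.pairwise_map.mpr
          ((PySem.List.sorted_pairwise g cardIdx).imp (by omega))
      · exact (PySem.List.sorted_perm _ _ _).trans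
          (((PySem.List.sorted_perm g cardIdx false).map _).symm)
    rw [run_eq_adj g hg, hsorted_scores, hmap1, adjAll_map]
    show _ = ((PySem.List.sorted g cardIdx).zip (PySem.List.sorted g cardIdx).tail).all
      (fun ab => (cardIdx ab.2 == cardIdx ab.1 + 1) && (isRed ab.1 != isRed ab.2))
    rw [zip_tail_eq_adjAll (fun a b => (cardIdx b == cardIdx a + 1) && (isRed a != isRed b))
      (PySem.List.sorted g cardIdx), adjAll_and]
    have hstep : adjAll (fun a b => step1 (cardIdx a + 1) (cardIdx b + 1)) (PySem.List.sorted g cardIdx)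
        = adjAll (fun a b => cardIdx b == cardIdx a + 1) (PySem.List.sorted g cardIdx) := by
      refine adjAll_congr _ _ _ (fun a _ b _ => ?_)
      rw [Bool.eq_iff_iff, beq_iff_eq, step1, beq_iff_eq]
      omega
    rw [hstep]
    by_cases hrun : adjAll (fun a b => cardIdx b == cardIdx a + 1) (PySem.List.sorted g cardIdx) = true
    · rw [hrun, Bool.true_and, Bool.true_and]
      -- distinct card values along the sorted list
      have hmapstep : adjAll step1 ((PySem.List.sorted g cardIdx).map cardIdx) = true := by
        rw [adjAll_map]; exact hrun
      have hpwlt : (PySem.List.sorted g cardIdx).Pairwise (fun a b => cardIdx a < cardIdx b) :=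
        List.pairwise_map.mp (adjAll_step1_pairwise _ hmapstep)
      have hbub := sort_cards_sorted (g.map (fun card => (card, comp10001huxxy_score [card])))
      have hSP : (g.map (fun card => (card, comp10001huxxy_score [card]))).Perm
          ((PySem.List.sorted g cardIdx).map (fun c => (c, comp10001huxxy_score [c]))) :=
        (((PySem.List.sorted_perm g cardIdx false).map _)).symm
      have hpair_lt : ((PySem.List.sorted g cardIdx).map (fun c => (c, comp10001huxxy_score [c]))).Pairwise
          (fun x y => x.2 < y.2) := by
        refine List.pairwise_map.mpr (List.Pairwise.imp_of_mem (fun {a b} ha hb hr => ?_) hpwlt)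
        rw [hscore _ (hSmem _ ha), hscore _ (hSmem _ hb)]
        omega
      have hperm2 : (sort_cards_by_value (g.map (fun card => (card, comp10001huxxy_score [card])))).Perm
          ((PySem.List.sorted g cardIdx).map (fun c => (c, comp10001huxxy_score [c]))) :=
        hbub.1.trans hSP
      have hnd : ((PySem.List.sorted g cardIdx).map (fun c => (c, comp10001huxxy_score [c]))).map
          (fun p => p.2) |>.Nodup :=
        List.pairwise_map.mpr (hpair_lt.imp (fun h => ne_of_lt h))
      have hnodup2 : (sort_cards_by_value (g.map (fun card => (card, comp10001huxxy_score [card])))).Pairwise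
          (fun x y => x.2 ≠ y.2) := by
        have h1 : (List.map (fun p : String × Int => p.2)
            (sort_cards_by_value (g.map (fun card => (card, comp10001huxxy_score [card]))))).Nodup :=
          (hperm2.map (fun p : String × Int => p.2)).nodup_iff.mpr hnd
        exact List.pairwise_map.mp h1
      have hlt2 : (sort_cards_by_value (g.map (fun card => (card, comp10001huxxy_score [card])))).Pairwise
          (fun x y => x.2 < y.2) :=
        (hbub.2.and hnodup2).imp (fun h => lt_of_le_of_ne h.1 h.2)
      have hb1 := PySem.List.sorted_eq_of_perm_of_pairwise_lt
        (g.map (fun card => (card, comp10001huxxy_score [card]))) _ (fun p => p.2) hbub.1 hlt2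
      have hb2 := PySem.List.sorted_eq_of_perm_of_pairwise_lt
        (g.map (fun card => (card, comp10001huxxy_score [card]))) _ (fun p => p.2) hSP.symm hpair_lt
      have hbeq : sort_cards_by_value (g.map (fun card => (card, comp10001huxxy_score [card])))
          = (PySem.List.sorted g cardIdx).map (fun c => (c, comp10001huxxy_score [c])) :=
        hb1.symm.trans hb2
      rw [show run_is_alternate_in_color g
          = (PySem.List.pyRange 0
              ((((sort_cards_by_value (g.map (fun card => (card, comp10001huxxy_score [card])))).map
                  (fun p => cardColor p.1)).length : Int) - 1)).all
              (fun i => !(PySem.List.pyGetD ((sort_cards_by_value (g.map (fun card =>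
                    (card, comp10001huxxy_score [card])))).map (fun p => cardColor p.1)) i ""
                  == PySem.List.pyGetD ((sort_cards_by_value (g.map (fun card =>
                    (card, comp10001huxxy_score [card])))).map (fun p => cardColor p.1)) (i + 1) ""))
        from rfl]
      rw [hbeq, List.map_map]
      rw [pyrange_adjAll (fun a b => !(a == b)) _ "", adjAll_map]
      refine adjAll_congr _ _ _ (fun a _ b _ => ?_)
      show (!(cardColor a == cardColor b)) = (isRed a != isRed b)
      have hcc : ∀ c, cardColor c = if isRed c then "red" else "black" := fun c => rfl
      rw [hcc, hcc]
      cases isRed a <;> cases isRed b <;> decide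
    · rw [Bool.eq_false_iff.mpr hrun, Bool.false_and, Bool.false_and]

-- deck check
theorem decks_eq (groups : List (List String)) :
    two_more_decks_used groups = (PySem.Dict.counter (groups.flatMap id)).values.any (fun c => c > 2) := by
  unfold two_more_decks_used
  have hnest : ∀ (gs : List (List String)) (d : PySem.Dict String Int),
      gs.foldl (fun d g => g.foldl (fun d card => d.modify card 0 (· + (1 : Int))) d) d
        = (gs.flatMap id).foldl (fun d card => d.modify card 0 (· + (1 : Int))) d := by
    intro gs
    induction gs with
    | nil => intro d; rfl
    | cons g gs ih => intro d; simp only [List.flatMap_cons, List.foldl_cons, List.foldl_append, id]; exact ih _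
  rw [hnest, ← PySem.Dict.counter_eq_foldl]
  rw [PySem.Dict.values_eq_map_keys _ (PySem.Dict.nodup_keys_counter _) 0, List.any_map]
  rfl

-- ===== VERDICT (by name: the statement is the Claim_ definition above) =====
theorem comp10001huxxy_valid_table_spec : Claim_equal_comp10001huxxy_valid_table := by
  intro groups _ hpre
  unfold Spec_comp10001huxxy_valid_table
  have hB : comp10001huxxy_valid_table_alt groups
      = (if groups.any (fun g => g.length < 3) then false
         else if (PySem.Dict.counter (groups.flatMap id)).values.any (fun c => c > 2) then false
         else groups.all altCheckGroup) := rfl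
  rw [hB]
  unfold comp10001huxxy_valid_table
  by_cases hshort : groups.any (fun g => g.length < 3) = true
  · rw [if_pos hshort, if_pos hshort]
  · rw [if_neg hshort, if_neg hshort, decks_eq]
    by_cases hdeck : (PySem.Dict.counter (groups.flatMap id)).values.any (fun c => c > 2) = true
    · rw [if_pos hdeck, if_pos hdeck]
    · rw [if_neg hdeck, if_neg hdeck]
      rw [Bool.not_eq_true] at hshort hdeck
      have hlen : ∀ g ∈ groups, ¬(g.length < 3) := by
        have := List.any_eq_false.mp hshort
        intro g hg
        simpa using this g hg
      have hwf : ∀ g ∈ groups, (∀ card ∈ g, wfCard card = true)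
          ∧ (sameFirst g = true ∨ ∀ card ∈ g, validVals.contains (card.toList.headD ' ') = true) := by
        rcases hpre with h | h | h
        · obtain ⟨g, hg, hlt⟩ := h
          exact absurd hlt (hlen g hg)
        · exfalso
          obtain ⟨card, hcmem, hcnt⟩ := h
          have hkey : card ∈ (PySem.Dict.counter (groups.flatMap id)).keys := by
            rw [PySem.Dict.keys_counter]
            exact (PySem.Set.mem_ofList _ _).mpr hcmem
          have hval : (PySem.Dict.counter (groups.flatMap id)).getD card 0
              ∈ (PySem.Dict.counter (groups.flatMap id)).values := by
            rw [PySem.Dict.values_eq_map_keys _ (PySem.Dict.nodup_keys_counter _) 0]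
            exact List.mem_map_of_mem hkey
          have := List.any_eq_false.mp hdeck _ hval
          rw [PySem.Dict.getD_counter] at this
          simp only [gt_iff_lt, decide_eq_true_eq] at this
          have : ¬((2 : Int) < ((groups.flatMap id).count card : Int)) := this
          omega
        · exact h
      rw [Bool.eq_iff_iff, List.all_eq_true, List.all_eq_true]
      have hne : ∀ g ∈ groups, g ≠ [] := by
        intro g hg
        have := hlen g hg
        exact List.ne_nil_of_length_pos (by omega)
      constructor
      · intro h x hx
        rw [← group_eq x (hne x hx) (hwf x hx).2]
        exact h x hx
      · intro h x hx
        rw [group_eq x (hne x hx) (hwf x hx).2]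
        exact h x hx
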